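-- pv_equiv track=rewrite | github.com/pelinski/TransformerGrooveInfilling | evaluations_mgeval/utils/inter_intra_utils.py | get_master_id_loops_dict
-- ===== SOURCE A (Python) =====
-- def get_master_id_loops_dict(loop_ids):
--     master_id_loops_dict = dict()
--     for loop_id in loop_ids:
--         master_id = loop_id.split(":")[0]
--         if master_id not in master_id_loops_dict.keys():
--             master_id_loops_dict.update({master_id: [loop_id]})
--         else:
--             master_id_loops_dict[master_id].append(loop_id)
--
--     loops_in_master_counts_dict = dict()
--     for key, set in master_id_loops_dict.items():
--         loops_in_master_counts_dict.update({key: len(set)})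
--     return master_id_loops_dict, loops_in_master_counts_dict
-- ===== SOURCE B (Python) =====
-- def get_master_id_loops_dict(loop_ids):
--     # Index by distinct master ids: split each id once, deduplicate the prefixes
--     # (first-occurrence order, like dict.fromkeys), then build each group with a
--     # per-key filter over the precomputed (prefix, id) pairs.
--     mids = [lid.split(":")[0] for lid in loop_ids]
--     keys = list(dict.fromkeys(mids))
--     groups = {k: [lid for m, lid in zip(mids, loop_ids) if m == k] for k in keys}
--     counts = {k: len(g) for k, g in groups.items()}
--     return groups, counts
-- ===== Notes on version B (the rewrite author's own statement) =====
-- stated objective: alternative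
-- what changed: B replaces A's incremental bucket-appending dict loop with an index-by-distinct-keys strategy: it first deduplicates the master prefixes (dict.fromkeys), then builds each group with a per-key filter comprehension over the input and takes counts from the finished groups; it trades A's single O(n) grouping pass for k filtering scans that need no membership test or in-place append.
import Mathlib
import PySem

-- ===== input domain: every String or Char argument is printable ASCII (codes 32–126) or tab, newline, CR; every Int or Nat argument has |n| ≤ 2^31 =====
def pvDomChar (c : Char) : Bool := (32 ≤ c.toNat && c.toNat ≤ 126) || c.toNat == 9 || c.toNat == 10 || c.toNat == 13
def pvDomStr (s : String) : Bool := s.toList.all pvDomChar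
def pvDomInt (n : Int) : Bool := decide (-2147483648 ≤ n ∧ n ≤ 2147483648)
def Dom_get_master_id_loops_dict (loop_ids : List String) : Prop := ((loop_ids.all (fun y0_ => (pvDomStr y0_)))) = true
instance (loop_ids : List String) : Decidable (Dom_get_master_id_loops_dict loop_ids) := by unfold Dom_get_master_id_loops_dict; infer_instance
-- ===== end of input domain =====

-- B indexes by the distinct master prefixes (dedup, then a per-key filter over the input)
-- instead of A's incremental bucket-appending dict loop; objective: alternative.

-- loop_id.split(":")[0]; split? with a nonempty literal separator is always `some`,
-- and Python's split never returns an empty list, so getD/headD defaults are unreachable.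
def pvMasterId (loop_id : String) : String :=
  ((PySem.Str.split? loop_id ":").getD []).headD ""

-- ===== PORT A =====
def get_master_id_loops_dict (loop_ids : List String) : (List (String × List String)) × (List (String × Int)) :=
  let master := loop_ids.foldl (fun d loop_id =>
    let master_id := pvMasterId loop_id
    if d.contains master_id = false then d.insert master_id [loop_id]
    else d.modify master_id [] (fun l => l ++ [loop_id])) PySem.Dict.empty
  let counts := master.items.foldl (fun c kv => c.insert kv.1 ((kv.2.length : Int))) PySem.Dict.empty
  (master.items, counts.items)

-- ===== PORT B =====
def get_master_id_loops_dict_alt (loop_ids : List String) : (List (String × List String)) × (List (String × Int)) :=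
  let mids := loop_ids.map (fun lid => pvMasterId lid)
  let keys := PySem.List.dedup mids
  let groups := keys.map (fun k => (k, ((mids.zip loop_ids).filter (fun p => p.1 == k)).map (fun p => p.2)))
  let counts := groups.map (fun p => (p.1, (p.2.length : Int)))
  (groups, counts)

-- ===== PRECONDITION & SPEC =====
def Spec_get_master_id_loops_dict (loop_ids : List String) (out : (List (String × List String)) × (List (String × Int))) : Prop := out = get_master_id_loops_dict_alt loop_ids
instance (loop_ids : List String) (out : (List (String × List String)) × (List (String × Int))) : Decidable (Spec_get_master_id_loops_dict loop_ids out) := by unfold Spec_get_master_id_loops_dict; infer_instance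

-- ===== CLAIM (what is proved, stated in full; the proofs are below) =====
def Claim_equal_get_master_id_loops_dict : Prop := ∀ (loop_ids : List String), Dom_get_master_id_loops_dict loop_ids → Spec_get_master_id_loops_dict loop_ids (get_master_id_loops_dict loop_ids)

-- ===== LEMMAS AND PROOFS =====

-- A's branching step is exactly `modify` (on an absent key, modify inserts f []).
theorem pv_stepA_eq (d : PySem.Dict String (List String)) (m lid : String) :
    (if d.contains m = false then d.insert m [lid]
     else d.modify m [] (fun l => l ++ [lid])) = d.modify m [] (fun l => l ++ [lid]) := by
  by_cases h : d.contains m = false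
  · simp [h, PySem.Dict.modify, PySem.Dict.getD_of_not_contains d [] h]
  · simp [h]

-- The grouping fold with its key drawn through a map, so the PySem modify lemmas apply.
theorem pv_group_eq (l : List String) :
    l.foldl (fun d lid => d.modify (pvMasterId lid) [] (fun g => g ++ [lid])) PySem.Dict.empty
      = (l.map (fun lid => (pvMasterId lid, lid))).foldl
          (fun d p => d.modify p.1 [] (fun g => g ++ [p.2])) PySem.Dict.empty := by
  rw [List.foldl_map]

theorem pv_group_keys (l : List String) :
    (l.foldl (fun d lid => d.modify (pvMasterId lid) [] (fun g => g ++ [lid]))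
        PySem.Dict.empty).keys = PySem.Set.ofList (l.map pvMasterId) := by
  rw [PySem.Dict.keys_foldl_modify_key l pvMasterId [] (fun _ lid g => g ++ [lid])]
  simp [PySem.Set.update_nil_left]

theorem pv_group_nodup (l : List String) :
    (l.foldl (fun d lid => d.modify (pvMasterId lid) [] (fun g => g ++ [lid]))
        PySem.Dict.empty).keys.Nodup :=
  PySem.Dict.nodup_keys_foldl_modify_key l pvMasterId [] (fun _ lid g => g ++ [lid])
    PySem.Dict.empty (by simp)

-- ===== VERDICT (by name: the statement is the Claim_ definition above) =====
theorem get_master_id_loops_dict_spec : Claim_equal_get_master_id_loops_dict := by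
  intro l _
  unfold Spec_get_master_id_loops_dict get_master_id_loops_dict get_master_id_loops_dict_alt
  dsimp only []
  -- A's grouping fold is the unguarded modify fold
  have hA : (fun (d : PySem.Dict String (List String)) lid =>
      if d.contains (pvMasterId lid) = false then d.insert (pvMasterId lid) [lid]
      else d.modify (pvMasterId lid) [] (fun g => g ++ [lid]))
      = fun d lid => d.modify (pvMasterId lid) [] (fun g => g ++ [lid]) := by
    funext d lid; exact pv_stepA_eq d (pvMasterId lid) lid
  simp only [hA]
  set g := l.foldl (fun d lid => d.modify (pvMasterId lid) [] (fun gr => gr ++ [lid]))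
    PySem.Dict.empty with hg
  -- A's items list is exactly B's groups list
  have hzip : ((l.map (fun lid => pvMasterId lid)).zip l)
      = l.map (fun lid => (pvMasterId lid, lid)) := by
    have := @List.zip_map' String String String (fun lid => pvMasterId lid) (fun lid => lid) l
    simpa using this
  have hitems : g.items = (PySem.List.dedup (l.map (fun lid => pvMasterId lid))).map
      (fun k => (k, (((l.map (fun lid => pvMasterId lid)).zip l).filter
        (fun p => p.1 == k)).map (fun p => p.2))) := by
    rw [hzip]
    rw [PySem.Dict.items_eq_map_keys g (pv_group_nodup l) []]
    rw [hg, pv_group_keys l]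
    simp only [PySem.List.dedup_eq_ofList]
    apply List.map_congr_left
    intro k _
    rw [← hg]
    rw [hg, pv_group_eq, PySem.Dict.getD_foldl_modify_append]
    simp
  refine Prod.ext hitems ?_
  -- A's second loop over g.items inserts fresh distinct keys, so it appends in order
  have hndA : (g.items.map (fun p => p.1)).Nodup := pv_group_nodup l
  have hfresh : ∀ a ∈ g.items, (PySem.Dict.empty : PySem.Dict String Int).contains a.1 = false := by
    intro a _; simp
  rw [PySem.Dict.items_foldl_insert_fresh g.items (fun p => p.1)
      (fun kv => (kv.2.length : Int)) PySem.Dict.empty hfresh hndA]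
  rw [hitems, List.map_map]
  simp [PySem.Dict.empty]
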